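-- pv_equiv track=rewrite | github.com/Victorcatteau/SPGlobal-OpsCon | Draft Code/Built-in functions/digital/domains.py | match_with_blacklist
-- ===== SOURCE A (Python) =====
-- def match_with_blacklist(url,blacklist):
--     meta = {}
--     for token in blacklist:
--         token = str(token)
--         if token in str(url):
--             if token in meta:
--                 meta[token] += 1
--             else:
--                 meta[token] = 1
--
--     return meta
-- ===== SOURCE B (Python) =====
-- def match_with_blacklist(url, blacklist):
--     s = str(url)
--     meta = {}
--     tokens = [str(t) for t in blacklist]
--     while tokens:
--         t = tokens[0]
--         rest = tokens[1:]
--         if t in s: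
--             meta[t] = 1 + rest.count(t)
--         tokens = [x for x in rest if x != t]
--     return meta
-- ===== Notes on version B (the rewrite author's own statement) =====
-- stated objective: alternative
-- what changed: Instead of A's single pass that conditionally increments a dict entry per blacklist element, B consumes a worklist: it repeatedly takes the first remaining token, counts all of its duplicates in the remainder at once with list.count, records the key once (so it never updates an existing entry), and deletes every copy of that token from the worklist before continuing.
import Mathlib
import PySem

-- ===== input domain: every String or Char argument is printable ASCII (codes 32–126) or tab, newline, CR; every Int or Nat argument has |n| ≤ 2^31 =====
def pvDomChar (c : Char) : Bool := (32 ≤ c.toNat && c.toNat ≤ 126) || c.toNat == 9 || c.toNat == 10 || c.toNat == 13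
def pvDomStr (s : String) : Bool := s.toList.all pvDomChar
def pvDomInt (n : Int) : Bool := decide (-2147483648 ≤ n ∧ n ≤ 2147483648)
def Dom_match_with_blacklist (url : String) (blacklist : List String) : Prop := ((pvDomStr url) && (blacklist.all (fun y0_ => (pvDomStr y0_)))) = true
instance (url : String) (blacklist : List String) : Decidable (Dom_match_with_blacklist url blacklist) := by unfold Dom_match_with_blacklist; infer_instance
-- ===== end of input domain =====

-- B replaces A's per-element conditional dict-increment pass by a worklist loop: take the
-- first remaining token, count its duplicates in the remainder at once, write the key once,
-- and delete all its copies before continuing (objective: alternative decomposition).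

-- ===== PORT A =====
def match_with_blacklist (url : String) (blacklist : List String) : List (String × Int) :=
  (blacklist.foldl
    (fun (d : PySem.Dict String Int) token =>
      if PySem.Str.isIn token url then
        if d.contains token then
          d.insert token (d.getD token 0 + 1)
        else
          d.insert token 1
      else d)
    PySem.Dict.empty).items

-- ===== PORT B =====
-- the 'while tokens:' loop of Source B: state = (tokens, acc)
def mbLoop (url : String) : List String → PySem.Dict String Int → PySem.Dict String Int
  | [], acc => acc
  | t :: rest, acc =>
      mbLoop url (rest.filter (fun x => !(x == t)))
        (if PySem.Str.isIn t url then acc.insert t (1 + (PySem.List.count rest t : Int)) else acc)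
termination_by l _ => l.length
decreasing_by
  apply Nat.lt_succ_of_le
  simpa using List.length_filter_le (fun (x : {x // x ∈ rest}) => !((x : String) == t)) rest.attach

def match_with_blacklist_alt (url : String) (blacklist : List String) : List (String × Int) :=
  (mbLoop url blacklist PySem.Dict.empty).items

-- ===== PRECONDITION & SPEC =====
def Spec_match_with_blacklist (url : String) (blacklist : List String) (out : List (String × Int)) : Prop := out = match_with_blacklist_alt url blacklist
instance (url : String) (blacklist : List String) (out : List (String × Int)) : Decidable (Spec_match_with_blacklist url blacklist out) := by unfold Spec_match_with_blacklist; infer_instance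

-- ===== CLAIM (what is proved, stated in full; the proofs are below) =====
def Claim_equal_match_with_blacklist : Prop := ∀ (url : String) (blacklist : List String), Dom_match_with_blacklist url blacklist → Spec_match_with_blacklist url blacklist (match_with_blacklist url blacklist)

-- ===== LEMMAS AND PROOFS =====

-- unfolding equations for the worklist loop (mbLoop is defined by well-founded recursion)
theorem mbLoop_nil (url : String) (acc : PySem.Dict String Int) : mbLoop url [] acc = acc := by
  rw [mbLoop.eq_def]

theorem mbLoop_cons (url t : String) (rest : List String) (acc : PySem.Dict String Int) :
    mbLoop url (t :: rest) acc
      = mbLoop url (rest.filter (fun x => !(x == t)))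
          (if PySem.Str.isIn t url then acc.insert t (1 + (PySem.List.count rest t : Int))
           else acc) := by
  rw [mbLoop.eq_def]

-- A's loop body, with the contains-branch collapsed: when the key is absent, getD is 0.
theorem pv_body_eq (url : String) :
    (fun (d : PySem.Dict String Int) token =>
      if PySem.Str.isIn token url then
        if d.contains token then
          d.insert token (d.getD token 0 + 1)
        else
          d.insert token 1
      else d)
    = (fun (d : PySem.Dict String Int) token =>
        if PySem.Str.isIn token url then d.insert token (d.getD token 0 + 1)
        else d) := by
  funext d token
  by_cases h : PySem.Str.isIn token url = true
  · simp only [if_pos h]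
    by_cases hc : d.contains token = true
    · simp [hc]
    · have hc' : d.contains token = false := by simpa using hc
      simp [hc', PySem.Dict.getD_of_not_contains d (0 : Int) hc']
  · rw [if_neg h, if_neg h]

-- first-occurrence dedup (Set.ofList) commutes with filter
theorem pv_ofList_filter (q : String → Bool) (l : List String) :
    PySem.Set.ofList (l.filter q) = (PySem.Set.ofList l).filter q := by
  induction l with
  | nil => rfl
  | cons a l ih =>
    by_cases hq : q a = true
    · rw [List.filter_cons_of_pos hq, PySem.Set.ofList_cons, PySem.Set.ofList_cons, ih,
        List.filter_cons_of_pos hq]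
      congr 1
      simp only [PySem.Set.discard, List.filter_filter]
      exact List.filter_congr (fun y _ => by rw [Bool.and_comm])
    · have hq' : q a = false := by simpa using hq
      rw [List.filter_cons_of_neg (by simp [hq']), PySem.Set.ofList_cons, ih,
        List.filter_cons_of_neg (by simp [hq'])]
      simp only [PySem.Set.discard, List.filter_filter]
      apply List.filter_congr
      intro y _
      cases hqy : q y with
      | false => simp
      | true =>
        have hya : (y == a) = false := by
          apply beq_eq_false_iff_ne.mpr
          rintro rfl
          rw [hq'] at hqy
          exact Bool.false_ne_true hqy
        simp [hya]

-- A equals Counter(filtered blacklist) read off as items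
theorem pv_A_eq_counter (url : String) (blacklist : List String) :
    match_with_blacklist url blacklist
      = ((PySem.Dict.counter blacklist).items).filter (fun p => PySem.Str.isIn p.1 url) := by
  unfold match_with_blacklist
  rw [pv_body_eq]
  rw [← List.foldl_filter (f := fun (d : PySem.Dict String Int) x => d.insert x (d.getD x 0 + 1))]
  rw [PySem.Dict.foldl_insert_getD_add_one_eq_counter, PySem.Dict.items_counter,
    PySem.Dict.items_counter, List.filter_map]
  simp only [Function.comp_def]
  rw [pv_ofList_filter]
  apply List.map_congr_left
  intro k hk
  have hq : PySem.Str.isIn k url = true := by simpa using (List.mem_filter.mp hk).2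
  rw [List.count_filter (p := fun token => PySem.Str.isIn token url) (a := k) (l := blacklist) hq]

-- invariant of B's worklist loop: processed keys are fresh, and it appends exactly the
-- filtered counted items of its remaining worklist
theorem pv_mbLoop_items (url : String) :
    ∀ (n : ℕ) (l : List String) (acc : PySem.Dict String Int), l.length ≤ n →
      (∀ x ∈ l, acc.contains x = false) →
      (mbLoop url l acc).items
        = acc.items
          ++ ((PySem.Set.ofList l).map (fun k => (k, (l.count k : Int)))).filter
               (fun p => PySem.Str.isIn p.1 url) := by
  intro n
  induction n with
  | zero =>
    intro l acc hlen _
    have : l = [] := List.eq_nil_of_length_eq_zero (Nat.le_zero.mp hlen)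
    subst this
    simp [mbLoop_nil]
  | succ n ih =>
    intro l acc hlen hfresh
    match l with
    | [] => simp [mbLoop_nil]
    | t :: rest =>
      have htail_len : (rest.filter (fun x => !(x == t))).length ≤ n := by
        have := List.length_filter_le (fun x => !(x == t)) rest
        simp at hlen; omega
      have htfresh : acc.contains t = false := hfresh t (by simp)
      have hmemtail : ∀ x ∈ rest.filter (fun x => !(x == t)), x ≠ t := by
        intro x hx
        have := (List.mem_filter.mp hx).2
        simpa using this
      -- the tail worklist, deduplicated
      have hofList_tail : PySem.Set.ofList (rest.filter (fun x => !(x == t)))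
          = PySem.Set.discard (PySem.Set.ofList rest) t := by
        rw [pv_ofList_filter]; rfl
      -- counts restricted to the tail agree with counts in rest for keys ≠ t
      have hcount_tail : ∀ k, k ≠ t →
          (rest.filter (fun x => !(x == t))).count k = rest.count k := by
        intro k hk
        exact List.count_filter (by simpa using hk)
      rw [mbLoop_cons]
      by_cases hin : PySem.Str.isIn t url = true
      · rw [if_pos hin]
        have hfresh' : ∀ x ∈ rest.filter (fun x => !(x == t)),
            (acc.insert t (1 + (PySem.List.count rest t : Int))).contains x = false := by
          intro x hx
          rw [PySem.Dict.contains_insert]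
          have h1 : (x == t) = false := beq_eq_false_iff_ne.mpr (hmemtail x hx)
          have h2 : acc.contains x = false :=
            hfresh x (List.mem_cons_of_mem _ (List.mem_of_mem_filter hx))
          simp [h1, h2]
        rw [ih _ _ htail_len hfresh',
          PySem.Dict.items_insert_of_not_contains _ _ htfresh]
        rw [PySem.Set.ofList_cons, List.map_cons, List.filter_cons_of_pos (by simpa using hin)]
        rw [hofList_tail]
        have hmapeq :
            (PySem.Set.discard (PySem.Set.ofList rest) t).map
                (fun k => (k, ((rest.filter (fun x => !(x == t))).count k : Int)))
            = (PySem.Set.discard (PySem.Set.ofList rest) t).map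
                (fun k => (k, ((t :: rest).count k : Int))) := by
          apply List.map_congr_left
          intro k hk
          have hkt : k ≠ t := by
            have := (List.mem_filter.mp hk).2
            simpa using this
          rw [hcount_tail k hkt, List.count_cons_of_ne (Ne.symm hkt)]
        rw [hmapeq]
        simp only [PySem.List.count_eq, List.count_cons_self, List.append_assoc]
        congr 2
        simp [Int.add_comm]
      · have hin' : PySem.Chars.isIn t.toList url.toList = false := by
          simpa [PySem.Str.isIn] using hin
        rw [if_neg (by simp [hin'])]
        have hfresh' : ∀ x ∈ rest.filter (fun x => !(x == t)), acc.contains x = false :=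
          fun x hx => hfresh x (List.mem_cons_of_mem _ (List.mem_of_mem_filter hx))
        rw [ih _ _ htail_len hfresh']
        rw [PySem.Set.ofList_cons, List.map_cons, List.filter_cons_of_neg (by simp [hin'])]
        rw [hofList_tail]
        have hmapeq :
            (PySem.Set.discard (PySem.Set.ofList rest) t).map
                (fun k => (k, ((rest.filter (fun x => !(x == t))).count k : Int)))
            = (PySem.Set.discard (PySem.Set.ofList rest) t).map
                (fun k => (k, ((t :: rest).count k : Int))) := by
          apply List.map_congr_left
          intro k hk
          have hkt : k ≠ t := by
            have := (List.mem_filter.mp hk).2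
            simpa using this
          rw [hcount_tail k hkt, List.count_cons_of_ne (Ne.symm hkt)]
        rw [hmapeq]

theorem pv_main (url : String) (blacklist : List String) :
    match_with_blacklist url blacklist = match_with_blacklist_alt url blacklist := by
  rw [pv_A_eq_counter, PySem.Dict.items_counter]
  unfold match_with_blacklist_alt
  rw [pv_mbLoop_items url blacklist.length blacklist PySem.Dict.empty le_rfl
    (fun x _ => PySem.Dict.contains_empty x)]
  have hemp : (PySem.Dict.empty : PySem.Dict String Int).items = [] := rfl
  rw [hemp, List.nil_append, List.filter_map]

-- ===== VERDICT (by name: the statement is the Claim_ definition above) =====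
theorem match_with_blacklist_spec : Claim_equal_match_with_blacklist := by
  intro url blacklist _
  exact pv_main url blacklist
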